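-- pv_equiv track=rewrite | github.com/emmartin-design/pptx-importer | excelreader2.py | format_vertical_series
-- ===== SOURCE A (Python) =====
-- def format_vertical_series(og_dict, series_names):
--     new_dict = {}
--     for key_idx, key in enumerate(og_dict):
--         if key_idx == 0:
--             new_dict[series_names[0]] = og_dict[key]
--             series_names.pop(0)
--         else:
--             for name_idx, name in enumerate(series_names):
--                 new_dict[name] = og_dict[key][name_idx::len(series_names)]
--     return new_dict
-- ===== SOURCE B (Python) =====
-- def format_vertical_series(og_dict, series_names):
--     # Round-robin demultiplexing: one distribution pass per key instead of
--     # k strided slicing passes.  Mutates series_names (pop(0)) like the original.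
--     new_dict = {}
--     keys = list(og_dict)
--     if keys:
--         new_dict[series_names[0]] = og_dict[keys[0]]
--         series_names.pop(0)
--         k = len(series_names)
--         for key in keys[1:]:
--             if k:
--                 buckets = [[] for _ in range(k)]
--                 for p, value in enumerate(og_dict[key]):
--                     buckets[p % k].append(value)
--                 for name, bucket in zip(series_names, buckets):
--                     new_dict[name] = bucket
--     return new_dict
-- ===== Notes on version B (the rewrite author's own statement) =====
-- stated objective: alternative
-- what changed: Replaces the k per-series strided slicing passes (v[i::k] for each remaining name) by a single round-robin distribution pass per key that appends each value to bucket p%k, then assigns buckets to names via zip; Pre_ excludes inputs where A raises IndexError (non-empty og_dict with empty series_names) and assoc lists with duplicate keys, which a Python dict argument cannot represent.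
import Mathlib
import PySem

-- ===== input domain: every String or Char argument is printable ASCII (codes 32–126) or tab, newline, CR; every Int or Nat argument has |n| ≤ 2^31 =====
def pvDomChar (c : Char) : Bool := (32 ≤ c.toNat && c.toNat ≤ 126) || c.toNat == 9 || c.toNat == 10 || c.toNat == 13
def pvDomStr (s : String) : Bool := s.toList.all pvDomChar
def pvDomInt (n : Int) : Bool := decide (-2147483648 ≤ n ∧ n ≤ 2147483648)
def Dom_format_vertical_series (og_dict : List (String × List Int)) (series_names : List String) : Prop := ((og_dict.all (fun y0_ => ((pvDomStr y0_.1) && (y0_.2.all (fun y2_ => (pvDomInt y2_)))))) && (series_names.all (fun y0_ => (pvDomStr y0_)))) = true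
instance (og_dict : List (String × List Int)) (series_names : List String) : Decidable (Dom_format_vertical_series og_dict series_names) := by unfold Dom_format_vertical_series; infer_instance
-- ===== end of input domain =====

-- B replaces A's k per-series strided slices per key by one round-robin distribution
-- pass per key (objective: alternative decomposition, not measured faster).
-- Both programs pop series_names[0] in place; the equivalence proved is about the
-- RETURN value (B performs the same mutation in Python).

-- ===== PORT A =====
-- A iterates the dict; 'og_dict[key]' is the pair's own value (exact because Pre_
-- requires distinct keys, the only form a Python dict argument can have).
def format_vertical_series (og_dict : List (String × List Int)) (series_names : List String) : List (String × List Int) :=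
  ((PySem.List.enumerate og_dict 0).foldl
    (fun (st : PySem.Dict String (List Int) × List String) p =>
      if p.1 == (0 : Int) then
        match PySem.List.pyGet? st.2 0 with            -- series_names[0]
        | some nm => (st.1.insert nm p.2.2, st.2.drop 1)   -- series_names.pop(0)
        | none => st                                    -- IndexError: outside Pre_
      else
        ((PySem.List.enumerate st.2 0).foldl
          (fun d q =>
            d.insert q.2 ((PySem.List.slice? p.2.2 (some q.1) none (st.2.length : Int)).getD []))
          st.1,
         st.2))
    (PySem.Dict.empty, series_names)).1.items

-- ===== PORT B =====
-- one round-robin pass: value at position p goes to bucket p % k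
def pvDistrib (xs : List Int) (k : Nat) : List (List Int) :=
  (xs.foldl
    (fun (st : List (List Int) × Nat) x =>
      (st.1.set (st.2 % k) (st.1.getD (st.2 % k) [] ++ [x]), st.2 + 1))
    (List.replicate k [], 0)).1

def format_vertical_series_alt (og_dict : List (String × List Int)) (series_names : List String) : List (String × List Int) :=
  match og_dict, series_names with
  | [], _ => []
  | _ :: _, [] => []                                    -- IndexError in B too: outside Pre_
  | (_, v0) :: rest, n0 :: names =>
    let k := names.length
    (rest.foldl
      (fun d (p : String × List Int) =>
        if k ≠ 0 then
          (names.zip (pvDistrib p.2 k)).foldl (fun d q => d.insert q.1 q.2) d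
        else d)
      ((PySem.Dict.empty : PySem.Dict String (List Int)).insert n0 v0)).items

-- ===== PRECONDITION & SPEC =====
-- Pre_ excludes (a) non-empty og_dict with empty series_names, where A raises
-- IndexError on series_names[0] (B raises there too), and (b) assoc lists with
-- duplicate keys, which no Python dict argument can represent.
def Pre_format_vertical_series (og_dict : List (String × List Int)) (series_names : List String) : Prop :=
  (og_dict = [] ∨ series_names ≠ []) ∧ (og_dict.map Prod.fst).Nodup
instance (og_dict : List (String × List Int)) (series_names : List String) : Decidable (Pre_format_vertical_series og_dict series_names) := by unfold Pre_format_vertical_series; infer_instance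

def pvWitness_format_vertical_series : (List (String × List Int)) × List String :=
  ([("a", [1, 2, 3, 4]), ("b", [5, 6, 7, 8])], ["x", "y", "z"])

def Spec_format_vertical_series (og_dict : List (String × List Int)) (series_names : List String) (out : List (String × List Int)) : Prop := out = format_vertical_series_alt og_dict series_names
instance (og_dict : List (String × List Int)) (series_names : List String) (out : List (String × List Int)) : Decidable (Spec_format_vertical_series og_dict series_names out) := by unfold Spec_format_vertical_series; infer_instance

-- ===== CLAIM (what is proved, stated in full; the proofs are below) =====
def Claim_equal_format_vertical_series : Prop := ∀ (og_dict : List (String × List Int)) (series_names : List String), Dom_format_vertical_series og_dict series_names → Pre_format_vertical_series og_dict series_names → Spec_format_vertical_series og_dict series_names (format_vertical_series og_dict series_names)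

-- ===== LEMMAS AND PROOFS =====
def pvStrided : List Int → Nat → List Int
  | [], _ => []
  | x :: t, k => x :: pvStrided (t.drop (k - 1)) k
termination_by xs => xs.length
decreasing_by simp [List.length_drop]

theorem pvStrided_eq_filterMap (xs : List Int) (k : Nat) (hk : 0 < k) :
    pvStrided xs k = (List.range ((xs.length + k - 1) / k)).filterMap (fun j => xs[k * j]?) := by
  induction xs, k using pvStrided.induct with
  | case1 k => simp [pvStrided]
  | case2 x t k ih =>
    rw [pvStrided, ih hk]
    have hcnt : ((t.drop (k - 1)).length + k - 1) / k = t.length / k := by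
      rcases Nat.le_total (k - 1) t.length with h | h
      · congr 1; rw [List.length_drop]; omega
      · rw [List.length_drop, Nat.div_eq_of_lt (by omega), Nat.div_eq_of_lt (by omega)]
    rw [hcnt]
    have h2 : ((x :: t).length + k - 1) / k = t.length / k + 1 := by
      rw [List.length_cons, show t.length + 1 + k - 1 = t.length + k by omega,
        Nat.add_div_right _ hk]
    rw [h2, List.range_succ_eq_map, List.filterMap_cons]
    simp only [Nat.mul_zero, List.getElem?_cons_zero, List.filterMap_map]
    congr 1
    refine List.filterMap_congr ?_
    intro j hj
    show (t.drop (k - 1))[k * j]? = (x :: t)[k * Nat.succ j]?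
    rw [List.getElem?_drop]
    have hks : k * Nat.succ j = ((k - 1) + k * j) + 1 := by
      rw [Nat.mul_succ]; generalize k * j = m; omega
    rw [hks, List.getElem?_cons_succ]

theorem pvSlice_eq_strided (v : List Int) (i k : Nat) (hk : 0 < k) :
    PySem.List.slice? v (some (i : Int)) none (k : Int) = some (pvStrided (v.drop i) k) := by
  rw [PySem.List.slice?, PySem.List.sliceIndices]
  simp only [if_neg (by omega : ¬ (k : Int) = 0), if_neg (by omega : ¬ (k : Int) < 0),
    if_neg (by omega : ¬ (i : Int) < 0)]
  rcases Nat.lt_or_ge i v.length with h | h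
  · rw [min_eq_left (by exact_mod_cast h.le)]
    rw [if_pos (by exact_mod_cast hk), if_pos (by exact_mod_cast h)]
    have hnum : ((v.length : Int) - i + k - 1) = ((v.length - i + k - 1 : Nat) : Int) := by
      omega
    have hdiv : (((v.length : Int) - i + k - 1) / k).toNat = (v.length - i + k - 1) / k := by
      rw [hnum, ← Int.natCast_ediv, Int.toNat_natCast]
    rw [hdiv, pvStrided_eq_filterMap _ _ hk]
    have hlen : ((v.drop i).length + k - 1) / k = (v.length - i + k - 1) / k := by
      rw [List.length_drop]
    rw [hlen]
    congr 1
    refine List.filterMap_congr ?_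
    intro j hj
    have hidx : ((i : Int) + k * j).toNat = i + k * j := by
      have : ((i : Int) + k * j) = ((i + k * j : Nat) : Int) := by push_cast; ring
      rw [this, Int.toNat_natCast]
    rw [hidx, List.getElem?_drop]
  · rw [min_eq_right (by exact_mod_cast h)]
    rw [if_pos (by exact_mod_cast hk), if_neg (lt_irrefl _)]
    simp [List.drop_eq_nil_of_le h, pvStrided]

def pvPick (k i : Nat) : List Int → Nat → List Int
  | [], _ => []
  | x :: t, q => if q % k = i then x :: pvPick k i t (q + 1) else pvPick k i t (q + 1)

theorem pvPick_eq_strided (k i : Nat) (hk : 0 < k) :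
    ∀ (v : List Int) (q d : Nat), d < k → (q + d) % k = i → pvPick k i v q = pvStrided (v.drop d) k := by
  intro v
  induction v with
  | nil => intro q d _ _; simp [pvPick, pvStrided]
  | cons x t ih =>
    intro q d hd hqd
    by_cases hq : q % k = i
    · have hd0 : d = 0 := by
        have h1 : (q + d) % k = (q % k + d) % k := by
          conv_lhs => rw [Nat.add_mod]
          rw [Nat.mod_eq_of_lt hd]
        have hql := Nat.mod_lt q hk
        rcases Nat.lt_or_ge (q % k + d) k with hlt | hge
        · rw [h1, Nat.mod_eq_of_lt hlt] at hqd
          omega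
        · have h3 : (q % k + d) % k = q % k + d - k := by
            rw [Nat.mod_eq_sub_mod hge, Nat.mod_eq_of_lt (by omega)]
          rw [h1, h3] at hqd
          omega
      subst hd0
      rw [pvPick, if_pos hq]
      simp only [List.drop_zero]
      rw [pvStrided]
      congr 1
      exact ih (q + 1) (k - 1) (by omega) (by rw [show q + 1 + (k - 1) = q + k by omega, Nat.add_mod_right]; omega)
    · obtain ⟨e, rfl⟩ : ∃ e, d = e + 1 := by
        cases d with
        | zero => exact absurd (by simpa using hqd) hq
        | succ e => exact ⟨e, rfl⟩
      rw [pvPick, if_neg hq, List.drop_succ_cons]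
      exact ih (q + 1) e (by omega) (by rw [show q + 1 + e = q + (e + 1) by omega]; exact hqd)

theorem pvSetGetD (bs : List (List Int)) (j : Nat) (a : List Int) (i : Nat) (hj : j < bs.length) :
    (bs.set j a).getD i [] = if j = i then a else bs.getD i [] := by
  simp only [List.getD_eq_getElem?_getD, List.getElem?_set, hj]
  split_ifs with h
  · subst h; simp
  · rfl

theorem pvFoldLen (k : Nat) :
    ∀ (xs : List Int) (bs : List (List Int)) (q : Nat),
      ((xs.foldl (fun (st : List (List Int) × Nat) x =>
        (st.1.set (st.2 % k) (st.1.getD (st.2 % k) [] ++ [x]), st.2 + 1)) (bs, q)).1).length = bs.length := by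
  intro xs
  induction xs with
  | nil => intro bs q; rfl
  | cons x xs ih =>
    intro bs q
    rw [List.foldl_cons]
    rw [ih]
    exact List.length_set ..

theorem pvFoldGetD (k : Nat) (hk : 0 < k) :
    ∀ (xs : List Int) (bs : List (List Int)) (q i : Nat), bs.length = k → i < k →
      ((xs.foldl (fun (st : List (List Int) × Nat) x =>
        (st.1.set (st.2 % k) (st.1.getD (st.2 % k) [] ++ [x]), st.2 + 1)) (bs, q)).1).getD i []
      = bs.getD i [] ++ pvPick k i xs q := by
  intro xs
  induction xs with
  | nil => intro bs q i _ _; simp [pvPick]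
  | cons x xs ih =>
    intro bs q i hlen hik
    rw [List.foldl_cons]
    have hq : q % k < bs.length := by rw [hlen]; exact Nat.mod_lt q hk
    rw [ih _ _ i (by rw [List.length_set]; exact hlen) hik]
    rw [pvSetGetD _ _ _ _ hq, pvPick]
    by_cases h : q % k = i
    · rw [if_pos h, if_pos h, h, List.append_assoc, List.singleton_append]
    · rw [if_neg h, if_neg h]

theorem pvDistrib_get (v : List Int) (k i : Nat) (hk : 0 < k) (hik : i < k) :
    (pvDistrib v k).getD i [] = pvPick k i v 0 := by
  rw [pvDistrib, pvFoldGetD k hk v _ 0 i (List.length_replicate) hik]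
  simp

theorem pvDistrib_len (v : List Int) (k : Nat) :
    (pvDistrib v k).length = k := by
  rw [pvDistrib, pvFoldLen]
  exact List.length_replicate

theorem pvPerKey (names : List String) (v : List Int) (d : PySem.Dict String (List Int)) :
    (PySem.List.enumerate names 0).foldl
      (fun d q => d.insert q.2 ((PySem.List.slice? v (some q.1) none (names.length : Int)).getD [])) d
    = if names.length ≠ 0 then
        (names.zip (pvDistrib v names.length)).foldl (fun d q => d.insert q.1 q.2) d
      else d := by
  rcases names with _ | ⟨n0, ns⟩
  · simp [PySem.List.enumerate]
  · have hk : 0 < (n0 :: ns).length := by simp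
    rw [if_pos (by simp)]
    have hmap : (PySem.List.enumerate (n0 :: ns) 0).map
          (fun q => (q.2, (PySem.List.slice? v (some q.1) none ((n0 :: ns).length : Int)).getD []))
        = (n0 :: ns).zip (pvDistrib v (n0 :: ns).length) := by
      apply List.ext_getElem
      · simp [PySem.List.length_enumerate, pvDistrib_len]
      · intro j h1 h2
        have hj : j < (n0 :: ns).length := by
          simpa [PySem.List.length_enumerate] using h1
        rw [List.getElem_map, PySem.List.getElem_enumerate, List.getElem_zip]
        simp only [zero_add]
        rw [pvSlice_eq_strided v j _ hk, Option.getD_some]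
        rw [← List.getD_eq_getElem (pvDistrib v (n0 :: ns).length) [] (by rw [pvDistrib_len]; exact hj)]
        rw [pvDistrib_get v _ j hk hj]
        rw [pvPick_eq_strided _ j hk v 0 j hj (by simpa using Nat.mod_eq_of_lt hj)]
    rw [← hmap, List.foldl_map]

theorem pvOuter (names : List String) :
    ∀ (rest : List (String × List Int)) (d : PySem.Dict String (List Int)) (s : Int), 1 ≤ s →
      (PySem.List.enumerate rest s).foldl
        (fun (st : PySem.Dict String (List Int) × List String) p =>
          if p.1 == (0 : Int) then
            match PySem.List.pyGet? st.2 0 with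
            | some nm => (st.1.insert nm p.2.2, st.2.drop 1)
            | none => st
          else
            ((PySem.List.enumerate st.2 0).foldl
              (fun d q => d.insert q.2 ((PySem.List.slice? p.2.2 (some q.1) none (st.2.length : Int)).getD [])) st.1,
             st.2)) (d, names)
      = (rest.foldl
          (fun d (p : String × List Int) =>
            if names.length ≠ 0 then
              (names.zip (pvDistrib p.2 names.length)).foldl (fun d q => d.insert q.1 q.2) d
            else d) d, names) := by
  intro rest
  induction rest with
  | nil => intro d s hs; simp [PySem.List.enumerate]
  | cons p rest ih =>
    intro d s hs
    rw [PySem.List.enumerate_cons, List.foldl_cons, List.foldl_cons]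
    have h0 : (s == (0 : Int)) = false := by simp; omega
    simp only [h0, Bool.false_eq_true, if_false]
    rw [pvPerKey]
    exact ih _ _ (by omega)

-- ===== VERDICT (by name: the statement is the Claim_ definition above) =====
theorem format_vertical_series_spec : Claim_equal_format_vertical_series := by
  intro og_dict series_names _hdom hpre
  unfold Spec_format_vertical_series
  rcases og_dict with _ | ⟨⟨kk, v0⟩, rest⟩
  · rcases series_names with _ | ⟨n0, ns⟩ <;> rfl
  · have hsn : series_names ≠ [] := by
      rcases hpre.1 with h | h
      · exact absurd h (by simp)
      · exact h
    rcases series_names with _ | ⟨n0, names⟩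
    · exact absurd rfl hsn
    unfold format_vertical_series format_vertical_series_alt
    rw [PySem.List.enumerate_cons, List.foldl_cons]
    have hget : PySem.List.pyGet? (n0 :: names) (0 : Int) = some n0 := by
      simp [PySem.List.pyGet?, PySem.List.pyIdx?]
    simp only [beq_self_eq_true, if_true, hget, List.drop_succ_cons, List.drop_zero, zero_add]
    rw [pvOuter names rest _ 1 (by norm_num)]
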